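-- pv_equiv track=rewrite | github.com/snowraph/Whackabot | whackabot.py | format_statuses
-- ===== SOURCE A (Python) =====
-- def format_statuses(statuses):
--     m = [0, 0, 0, 0, 0] #2xx, 3xx, 4xx, 5xx, other
--     for k, v in statuses.items():
--         if   k[0] == '2': m[0] += v
--         elif k[0] == '3': m[1] += v
--         elif k[0] == '4': m[2] += v
--         elif k[0] == '5': m[3] += v
--         else: m[4] += v
--     return '/'.join(map(str, m))
-- ===== SOURCE B (Python) =====
-- def format_statuses(statuses):
--     def bucket(c):
--         return sum(v for k, v in statuses.items() if k[0] == c)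
--     two, three, four, five = bucket('2'), bucket('3'), bucket('4'), bucket('5')
--     other = sum(statuses.values()) - (two + three + four + five)
--     return '/'.join(map(str, (two, three, four, five, other)))
-- ===== Notes on version B (the rewrite author's own statement) =====
-- stated objective: alternative
-- what changed: A's single fold with an if/elif chain over five mutable counters is replaced by per-bucket filtered sums, with the 'other' bucket computed as the total of all values minus the four named buckets.
import Mathlib
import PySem

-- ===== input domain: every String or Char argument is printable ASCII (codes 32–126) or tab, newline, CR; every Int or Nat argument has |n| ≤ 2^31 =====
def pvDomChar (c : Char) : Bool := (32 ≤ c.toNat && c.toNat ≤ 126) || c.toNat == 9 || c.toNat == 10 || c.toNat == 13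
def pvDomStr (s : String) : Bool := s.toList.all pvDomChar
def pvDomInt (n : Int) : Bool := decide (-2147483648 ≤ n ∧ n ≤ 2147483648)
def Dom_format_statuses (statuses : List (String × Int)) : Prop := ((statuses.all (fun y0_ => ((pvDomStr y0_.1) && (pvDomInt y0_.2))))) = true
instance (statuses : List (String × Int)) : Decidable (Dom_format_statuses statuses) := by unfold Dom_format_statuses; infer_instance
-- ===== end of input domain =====

-- ===== PORT A =====
-- A: one fold over statuses.items() with an if/elif chain updating five counters.
-- k[0] is PySem.Str.pyGet? k 0; the none case (empty key, where Python raises) is excluded by Pre_.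
def fsStep (m : Int × Int × Int × Int × Int) (kv : String × Int) : Int × Int × Int × Int × Int :=
  if PySem.Str.pyGet? kv.1 0 == some '2' then (m.1 + kv.2, m.2.1, m.2.2.1, m.2.2.2.1, m.2.2.2.2)
  else if PySem.Str.pyGet? kv.1 0 == some '3' then (m.1, m.2.1 + kv.2, m.2.2.1, m.2.2.2.1, m.2.2.2.2)
  else if PySem.Str.pyGet? kv.1 0 == some '4' then (m.1, m.2.1, m.2.2.1 + kv.2, m.2.2.2.1, m.2.2.2.2)
  else if PySem.Str.pyGet? kv.1 0 == some '5' then (m.1, m.2.1, m.2.2.1, m.2.2.2.1 + kv.2, m.2.2.2.2)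
  else (m.1, m.2.1, m.2.2.1, m.2.2.2.1, m.2.2.2.2 + kv.2)

def format_statuses (statuses : List (String × Int)) : String :=
  let m := statuses.foldl fsStep (0, 0, 0, 0, 0)
  PySem.Str.join "/" [PySem.Int.toStr m.1, PySem.Int.toStr m.2.1, PySem.Int.toStr m.2.2.1,
    PySem.Int.toStr m.2.2.2.1, PySem.Int.toStr m.2.2.2.2]

-- ===== PORT B =====
-- B: sum(v for k, v in statuses.items() if k[0] == c) for each named class; 'other' = total - the four.
def fsBucket (statuses : List (String × Int)) (c : Char) : Int :=
  ((statuses.filter (fun p => PySem.Str.pyGet? p.1 0 == some c)).map (·.2)).sum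

def format_statuses_alt (statuses : List (String × Int)) : String :=
  let two := fsBucket statuses '2'
  let three := fsBucket statuses '3'
  let four := fsBucket statuses '4'
  let five := fsBucket statuses '5'
  let other := (statuses.map (·.2)).sum - (two + three + four + five)
  PySem.Str.join "/" [PySem.Int.toStr two, PySem.Int.toStr three, PySem.Int.toStr four,
    PySem.Int.toStr five, PySem.Int.toStr other]

-- ===== PRECONDITION & SPEC =====
-- Pre_ excludes inputs containing an empty-string key, on which Python A (k[0]) raises IndexError (B raises there too).
def Pre_format_statuses (statuses : List (String × Int)) : Prop :=
  ∀ kv ∈ statuses, kv.1 ≠ ""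
instance (statuses : List (String × Int)) : Decidable (Pre_format_statuses statuses) := by
  unfold Pre_format_statuses; infer_instance

def pvWitness_format_statuses : (List (String × Int)) := [("200", 3), ("404", 1), ("timeout", 2)]

def Spec_format_statuses (statuses : List (String × Int)) (out : String) : Prop := out = format_statuses_alt statuses
instance (statuses : List (String × Int)) (out : String) : Decidable (Spec_format_statuses statuses out) := by unfold Spec_format_statuses; infer_instance

-- ===== CLAIM (what is proved, stated in full; the proofs are below) =====
def Claim_equal_format_statuses : Prop := ∀ (statuses : List (String × Int)), Dom_format_statuses statuses → Pre_format_statuses statuses → Spec_format_statuses statuses (format_statuses statuses)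

-- ===== LEMMAS AND PROOFS =====

-- A's fold, started from an arbitrary accumulator, is B's bucket sums shifted by that accumulator.
theorem fsLoop_eq (l : List (String × Int)) (m : Int × Int × Int × Int × Int) :
    l.foldl fsStep m =
      (m.1 + fsBucket l '2', m.2.1 + fsBucket l '3', m.2.2.1 + fsBucket l '4',
       m.2.2.2.1 + fsBucket l '5',
       m.2.2.2.2 + ((l.map (·.2)).sum -
         (fsBucket l '2' + fsBucket l '3' + fsBucket l '4' + fsBucket l '5'))) := by
  induction l generalizing m with
  | nil => simp [fsBucket]
  | cons kv rest ih =>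
    simp only [List.foldl_cons, ih, fsStep, fsBucket, List.filter_cons, List.map_cons,
      List.sum_cons]
    split_ifs with h2 h3 h4 h5 <;> simp_all [Prod.ext_iff] <;> omega

-- ===== VERDICT (by name: the statement is the Claim_ definition above) =====
theorem format_statuses_spec : Claim_equal_format_statuses := by
  intro statuses _ _
  unfold Spec_format_statuses format_statuses format_statuses_alt
  rw [fsLoop_eq]
  simp
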